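-- pv_equiv track=rewrite | github.com/MWest2020/Ops_to_Biz | audit/report_generation.py | _top3_aanbevelingen
-- ===== SOURCE A (Python) =====
-- def _top3_aanbevelingen(bevindingen: list[dict]) -> str:
--     nc_items = [b for b in bevindingen if b["classificatie"] == "NC"]
--     ofi_items = [b for b in bevindingen if b["classificatie"] == "OFI"]
--     top3 = (nc_items + ofi_items)[:3]
--     if not top3:
--         return "Geen openstaande aanbevelingen."
--     return "\n".join(
--         f"{i+1}. Clausule {b['clausule']}: {b['beschrijving'][:120]}"
--         for i, b in enumerate(top3)
--     )
-- ===== SOURCE B (Python) =====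
-- def _top3_aanbevelingen(bevindingen: list[dict]) -> str:
--     def render(items, i):
--         if i > 3 or not items:
--             return []
--         b = items[0]
--         line = f"{i}. Clausule {b['clausule']}: {b['beschrijving'][:120]}"
--         return [line] + render(items[1:], i + 1)
--
--     nc = []
--     ofi = []
--     for b in bevindingen:
--         c = b["classificatie"]
--         if c == "NC":
--             nc.append(b)
--         elif c == "OFI":
--             ofi.append(b)
--     lines = render(nc + ofi, 1)
--     if not lines:
--         return "Geen openstaande aanbevelingen."
--     return "\n".join(lines)
-- ===== Notes on version B (the rewrite author's own statement) =====
-- stated objective: alternative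
-- what changed: Replaces the two comprehension passes and the enumerate/slice formatting by a single partition loop with two accumulators and a recursive line renderer that carries a 1-based counter and stops after the third line, so no slicing or enumerate is needed.
import Mathlib
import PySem

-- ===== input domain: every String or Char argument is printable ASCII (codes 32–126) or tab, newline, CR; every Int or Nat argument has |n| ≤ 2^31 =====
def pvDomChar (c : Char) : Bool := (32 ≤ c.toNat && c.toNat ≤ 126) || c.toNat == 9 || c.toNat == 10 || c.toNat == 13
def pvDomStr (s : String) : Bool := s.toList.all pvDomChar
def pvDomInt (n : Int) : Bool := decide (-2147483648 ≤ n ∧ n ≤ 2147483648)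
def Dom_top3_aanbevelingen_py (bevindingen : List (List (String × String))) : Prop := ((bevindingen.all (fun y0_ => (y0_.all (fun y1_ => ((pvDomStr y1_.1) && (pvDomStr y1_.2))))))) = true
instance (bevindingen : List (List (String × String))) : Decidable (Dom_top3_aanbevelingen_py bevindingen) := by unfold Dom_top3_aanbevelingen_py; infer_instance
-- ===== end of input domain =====

-- B replaces A's two comprehension passes + slice/enumerate formatting by one partition
-- loop with two accumulators and a recursive line renderer carrying a 1-based counter
-- that stops after the third line; same output (alternative decomposition, not faster).


-- ===== PORT A =====
-- b["classificatie"] == "NC" is ported as get? … == some "NC" (a missing key raises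
-- KeyError in Python; such inputs are excluded by Pre_ below, where Dict.getD's ""
-- default for 'clausule'/'beschrijving' is likewise unreachable).
def top3_aanbevelingen_py (bevindingen : List (List (String × String))) : String :=
  let nc_items := bevindingen.filter (fun b => (PySem.Dict.mk b).get? "classificatie" == some "NC")
  let ofi_items := bevindingen.filter (fun b => (PySem.Dict.mk b).get? "classificatie" == some "OFI")
  let top3 := PySem.List.slice (nc_items ++ ofi_items) none (some 3)
  if top3 = [] then "Geen openstaande aanbevelingen."
  else PySem.Str.join "\n" ((PySem.List.enumerate top3 0).map (fun ib =>
    PySem.Int.toStr (ib.1 + 1) ++ ". Clausule " ++ (PySem.Dict.mk ib.2).getD "clausule" "" ++ ": " ++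
    PySem.Str.slice ((PySem.Dict.mk ib.2).getD "beschrijving" "") none (some 120)))

-- ===== PORT B =====
-- Source B's recursive 'render(items, i)': one formatted line per item, counter i, stop past 3
def pvRender : List (List (String × String)) → Int → List String
  | [], _ => []
  | b :: rest, i =>
    if i > 3 then []
    else (PySem.Int.toStr i ++ ". Clausule " ++ (PySem.Dict.mk b).getD "clausule" "" ++ ": " ++
          PySem.Str.slice ((PySem.Dict.mk b).getD "beschrijving" "") none (some 120))
         :: pvRender rest (i + 1)

-- Source B's loop body: route item b into the nc- or ofi-accumulator (or drop it)
def pvStep (acc : List (List (String × String)) × List (List (String × String)))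
    (b : List (String × String)) :
    List (List (String × String)) × List (List (String × String)) :=
  let c := (PySem.Dict.mk b).get? "classificatie"
  if c == some "NC" then (acc.1 ++ [b], acc.2)
  else if c == some "OFI" then (acc.1, acc.2 ++ [b])
  else acc

-- Source B: single for-loop partitioning into the nc/ofi accumulators, then render, then join
def top3_aanbevelingen_py_alt (bevindingen : List (List (String × String))) : String :=
  let p := bevindingen.foldl pvStep ([], [])
  let lines := pvRender (p.1 ++ p.2) 1
  if lines = [] then "Geen openstaande aanbevelingen."
  else PySem.Str.join "\n" lines

-- ===== PRECONDITION & SPEC =====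
-- Pre_ excludes exactly the inputs on which Python A raises KeyError: an item without a
-- "classificatie" key, or an item among the selected top 3 without "clausule"/"beschrijving".
def Pre_top3_aanbevelingen_py (bevindingen : List (List (String × String))) : Prop :=
  (∀ b ∈ bevindingen, (PySem.Dict.mk b).contains "classificatie" = true) ∧
  (∀ b ∈ ((bevindingen.filter (fun b => (PySem.Dict.mk b).get? "classificatie" == some "NC") ++
           bevindingen.filter (fun b => (PySem.Dict.mk b).get? "classificatie" == some "OFI")).take 3),
     (PySem.Dict.mk b).contains "clausule" = true ∧ (PySem.Dict.mk b).contains "beschrijving" = true)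
instance (bevindingen : List (List (String × String))) : Decidable (Pre_top3_aanbevelingen_py bevindingen) := by unfold Pre_top3_aanbevelingen_py; infer_instance

def pvWitness_top3_aanbevelingen_py : (List (List (String × String))) :=
  [[("classificatie", "NC"), ("clausule", "7.1"), ("beschrijving", "meetprocedure ontbreekt")],
   [("classificatie", "OFI"), ("clausule", "9.2"), ("beschrijving", "auditprogramma")]]

def Spec_top3_aanbevelingen_py (bevindingen : List (List (String × String))) (out : String) : Prop := out = top3_aanbevelingen_py_alt bevindingen
instance (bevindingen : List (List (String × String))) (out : String) : Decidable (Spec_top3_aanbevelingen_py bevindingen out) := by unfold Spec_top3_aanbevelingen_py; infer_instance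

-- ===== CLAIM (what is proved, stated in full; the proofs are below) =====
def Claim_equal_top3_aanbevelingen_py : Prop := ∀ (bevindingen : List (List (String × String))), Dom_top3_aanbevelingen_py bevindingen → Pre_top3_aanbevelingen_py bevindingen → Spec_top3_aanbevelingen_py bevindingen (top3_aanbevelingen_py bevindingen)

-- ===== LEMMAS AND PROOFS =====

theorem pvWitness_ok : Dom_top3_aanbevelingen_py pvWitness_top3_aanbevelingen_py ∧ Pre_top3_aanbevelingen_py pvWitness_top3_aanbevelingen_py := by
  constructor <;> decide

-- the partition loop is the pair of A's two filters
theorem partition_eq (xs : List (List (String × String)))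
    (nc0 ofi0 : List (List (String × String))) :
    xs.foldl pvStep (nc0, ofi0)
    = (nc0 ++ xs.filter (fun b => (PySem.Dict.mk b).get? "classificatie" == some "NC"),
       ofi0 ++ xs.filter (fun b => (PySem.Dict.mk b).get? "classificatie" == some "OFI")) := by
  induction xs generalizing nc0 ofi0 with
  | nil => simp
  | cons b xs ih =>
      rw [List.foldl_cons]
      by_cases hnc : ((PySem.Dict.mk b).get? "classificatie" == some "NC") = true
      · have hofi : ((PySem.Dict.mk b).get? "classificatie" == some "OFI") = false := by
          have := eq_of_beq hnc; simp [this]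
        have hstep : pvStep (nc0, ofi0) b = (nc0 ++ [b], ofi0) := by simp [pvStep, hnc]
        rw [hstep, ih]
        simp [hnc, hofi, List.append_assoc]
      · by_cases hofi : ((PySem.Dict.mk b).get? "classificatie" == some "OFI") = true
        · have hstep : pvStep (nc0, ofi0) b = (nc0, ofi0 ++ [b]) := by
            simp [pvStep, hnc, hofi]
          rw [hstep, ih]
          simp [hnc, hofi, List.append_assoc]
        · have hstep : pvStep (nc0, ofi0) b = (nc0, ofi0) := by
            simp [pvStep, hnc, hofi]
          rw [hstep, ih]
          simp [hnc, hofi]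

-- the recursive renderer starting at 1 produces exactly A's formatted lines of the top 3
theorem render_eq (xs : List (List (String × String))) :
    pvRender xs 1
      = (PySem.List.enumerate (PySem.List.slice xs none (some 3)) 0).map (fun ib =>
          PySem.Int.toStr (ib.1 + 1) ++ ". Clausule " ++ (PySem.Dict.mk ib.2).getD "clausule" "" ++ ": " ++
          PySem.Str.slice ((PySem.Dict.mk ib.2).getD "beschrijving" "") none (some 120)) := by
  have hsl : PySem.List.slice xs none (some 3) = xs.take 3 := by
    simpa using PySem.List.slice_to_natCast (xs := xs) (b := 3)
  rw [hsl]
  match xs with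
  | [] => simp [pvRender]
  | [a] => simp [pvRender, PySem.List.enumerate]
  | [a, b] => simp [pvRender, PySem.List.enumerate]
  | a :: b :: c :: rest =>
      have h4 : pvRender rest 4 = [] := by cases rest <;> simp [pvRender]
      simp [pvRender, PySem.List.enumerate, h4]

-- ===== VERDICT (by name: the statement is the Claim_ definition above) =====
theorem top3_aanbevelingen_py_spec : Claim_equal_top3_aanbevelingen_py := by
  intro bevindingen _ _
  unfold Spec_top3_aanbevelingen_py top3_aanbevelingen_py top3_aanbevelingen_py_alt
  rw [partition_eq]
  simp only
  rw [render_eq]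
  cases h : PySem.List.slice
      (bevindingen.filter (fun b => (PySem.Dict.mk b).get? "classificatie" == some "NC") ++
       bevindingen.filter (fun b => (PySem.Dict.mk b).get? "classificatie" == some "OFI"))
      none (some 3) with
  | nil => simp [h]
  | cons y ys => simp [h, PySem.List.enumerate]
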